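-- pv_equiv track=rewrite | github.com/chillymosh/everybodycodes | 2024/day7/python/day7.py | calculate_total_essence
-- ===== SOURCE A (Python) =====
-- def calculate_total_essence(
--     actions: list[str], segments: int = 10, start_power: int = 10
-- ) -> int:
--     actions_len = len(actions)
--     power = start_power
--     total_essence = 0
--
--     for i in range(segments):
--         action = actions[i % actions_len]
--         if action == "+":
--             power += 1
--         elif action == "-" and power > 0:
--             power -= 1
--         total_essence += power
--
--     return total_essence
-- ===== SOURCE B (Python) =====
-- def calculate_total_essence(
--     actions: list[str], segments: int = 10, start_power: int = 10
-- ) -> int: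
--     # Cycle-level algorithm: simulate whole cycles only while the floor clamp can
--     # engage; once power >= `need`, runs of clamp-free cycles are summed with a
--     # closed-form arithmetic series, and a fixed point of the cycle map is
--     # multiplied out.
--     if segments <= 0:
--         return 0
--     n = len(actions)
--     deltas = [1 if a == "+" else (-1 if a == "-" else 0) for a in actions]
--     net = sum(deltas)
--     # minimal starting power for which a whole cycle is clamp-free
--     need = 0
--     s = 0
--     for d in deltas:
--         if d == -1 and 1 - s > need:
--             need = 1 - s
--         s += d
--     # essence of one clamp-free cycle started at power 0
--     base = 0
--     s = 0
--     for d in deltas: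
--         s += d
--         base += s
--
--     def run_cycle(p):
--         e = 0
--         for a in actions:
--             if a == "+":
--                 p += 1
--             elif a == "-" and p > 0:
--                 p -= 1
--             e += p
--         return p, e
--
--     q, r = divmod(segments, n)
--     total = 0
--     p = start_power
--     while q > 0:
--         if p >= need:
--             if net >= 0:
--                 k = q
--             else:
--                 k = min(q, max(1, -((p - need + 1) // net)))
--             total += k * base + n * (k * p + net * k * (k - 1) // 2)
--             p += k * net
--             q -= k
--         else:
--             p2, e = run_cycle(p)
--             total += e
--             q -= 1
--             if p2 == p:
--                 total += q * e
--                 q = 0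
--             p = p2
--     for a in actions[:r]:
--         if a == "+":
--             p += 1
--         elif a == "-" and p > 0:
--             p -= 1
--         total += p
--     return total
-- ===== Notes on version B (the rewrite author's own statement) =====
-- stated objective: alternative
-- what changed: Instead of simulating every one of the `segments` steps, B works cycle by cycle: it simulates a full cycle only while the floor-0 clamp can engage (power below a precomputed threshold), detects fixed points of the cycle map and multiplies them out, and sums runs of clamp-free cycles with a closed-form arithmetic series.
import Mathlib
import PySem

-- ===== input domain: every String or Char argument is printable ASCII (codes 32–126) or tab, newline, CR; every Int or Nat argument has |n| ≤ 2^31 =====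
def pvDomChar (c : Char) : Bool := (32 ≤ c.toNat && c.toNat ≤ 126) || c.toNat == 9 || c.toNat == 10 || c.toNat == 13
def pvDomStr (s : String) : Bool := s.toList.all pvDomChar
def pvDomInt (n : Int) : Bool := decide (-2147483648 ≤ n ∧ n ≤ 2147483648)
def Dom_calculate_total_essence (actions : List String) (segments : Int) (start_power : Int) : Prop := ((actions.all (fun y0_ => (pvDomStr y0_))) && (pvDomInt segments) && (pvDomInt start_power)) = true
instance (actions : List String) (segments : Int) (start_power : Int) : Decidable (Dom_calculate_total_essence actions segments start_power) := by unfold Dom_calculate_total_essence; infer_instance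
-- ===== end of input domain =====

-- B replaces A's step-by-step walk over all `segments` actions by cycle-level
-- arithmetic: clamp-free cycles are summed by a closed-form series and fixed
-- points of the cycle map are multiplied out (an alternative algorithm).

-- ===== PORT A =====
def calculate_total_essence (actions : List String) (segments : Int) (start_power : Int) : Int :=
  let actions_len : Int := (actions.length : Int)
  let st :=
    (PySem.List.pyRange 0 segments 1).foldl
      (fun (s : Int × Int) (i : Int) =>
        let action := PySem.List.pyGetD actions (PySem.Int.mod i actions_len) ""
        let power : Int :=
          if action = "+" then s.1 + 1
          else if action = "-" ∧ s.1 > 0 then s.1 - 1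
          else s.1
        (power, s.2 + power))
      (start_power, 0)
  st.2

-- ===== PORT B =====
-- Source B's one-step power update (shared by run_cycle and the remainder loop)
def pvStep (p : Int) (a : String) : Int :=
  if a = "+" then p + 1 else if a = "-" ∧ p > 0 then p - 1 else p

def pvDelta (a : String) : Int :=
  if a = "+" then 1 else if a = "-" then -1 else 0

-- Source B's run_cycle: one simulated cycle, returning (new power, essence)
def pvRunCycle (actions : List String) (p : Int) : Int × Int :=
  actions.foldl (fun (s : Int × Int) a => let p' := pvStep s.1 a; (p', s.2 + p')) (p, 0)

-- Source B's `need` loop (running prefix sum s, running max need)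
def pvNeed (deltas : List Int) : Int :=
  (deltas.foldl
    (fun (st : Int × Int) d =>
      (if d = -1 ∧ 1 - st.2 > st.1 then 1 - st.2 else st.1, st.2 + d)) (0, 0)).1

-- Source B's `base` loop (essence of one clamp-free cycle started at power 0)
def pvBase (deltas : List Int) : Int :=
  (deltas.foldl (fun (st : Int × Int) d => (st.1 + (st.2 + d), st.2 + d)) (0, 0)).1

-- Source B's while loop over remaining full cycles
def pvLoop (actions : List String) (n net need base : Int) (q p total : Int) :
    Int × Int :=
  if _hq : 0 < q then
    if need ≤ p then
      let k : Int :=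
        if 0 ≤ net then q
        else min q (max 1 (-(PySem.Int.floordiv (p - need + 1) net)))
      pvLoop actions n net need base (q - k) (p + k * net)
        (total + k * base + n * (k * p + PySem.Int.floordiv (net * k * (k - 1)) 2))
    else
      let pe := pvRunCycle actions p
      if pe.1 = p then (p, (total + pe.2) + (q - 1) * pe.2)
      else pvLoop actions n net need base (q - 1) pe.1 (total + pe.2)
  else (p, total)
termination_by q.toNat
decreasing_by
  · split <;> omega
  · omega

def calculate_total_essence_alt (actions : List String) (segments : Int) (start_power : Int) : Int :=
  if segments ≤ 0 then 0
  else
    let n : Int := (actions.length : Int)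
    let deltas := actions.map pvDelta
    let net := deltas.sum
    let need := pvNeed deltas
    let base := pvBase deltas
    let q := PySem.Int.floordiv segments n
    let r := PySem.Int.mod segments n
    let pt := pvLoop actions n net need base q start_power 0
    ((PySem.List.slice actions none (some r)).foldl
      (fun (s : Int × Int) a => let p' := pvStep s.1 a; (p', s.2 + p')) pt).2

-- ===== PRECONDITION & SPEC =====
-- Pre_ excludes only empty `actions` with positive `segments`, where A raises
-- ZeroDivisionError (i % 0); everywhere A returns, Pre_ holds.
def Pre_calculate_total_essence (actions : List String) (segments : Int) (start_power : Int) : Prop :=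
  segments ≤ 0 ∨ actions ≠ []
instance (actions : List String) (segments : Int) (start_power : Int) : Decidable (Pre_calculate_total_essence actions segments start_power) := by unfold Pre_calculate_total_essence; infer_instance

def pvWitness_calculate_total_essence : List String × Int × Int := (["+", "-", "x"], 7, 2)

def Spec_calculate_total_essence (actions : List String) (segments : Int) (start_power : Int) (out : Int) : Prop := out = calculate_total_essence_alt actions segments start_power
instance (actions : List String) (segments : Int) (start_power : Int) (out : Int) : Decidable (Spec_calculate_total_essence actions segments start_power out) := by unfold Spec_calculate_total_essence; infer_instance

-- ===== CLAIM (what is proved, stated in full; the proofs are below) =====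
def Claim_equal_calculate_total_essence : Prop := ∀ (actions : List String) (segments : Int) (start_power : Int), Dom_calculate_total_essence actions segments start_power → Pre_calculate_total_essence actions segments start_power → Spec_calculate_total_essence actions segments start_power (calculate_total_essence actions segments start_power)

-- ===== LEMMAS AND PROOFS =====

-- the shared fold body: run a list of actions, accumulating (power, essence)
def pvRun (l : List String) (s : Int × Int) : Int × Int :=
  l.foldl (fun (s : Int × Int) a => let p' := pvStep s.1 a; (p', s.2 + p')) s

-- iterate whole cycles
def pvCyc (actions : List String) : Nat → (Int × Int) → Int × Int
  | 0, s => s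
  | k + 1, s => pvCyc actions k (pvRun actions s)

-- recursive characterisations of need / net / base
def needR : List String → Int
  | [] => 0
  | a :: l => max (if a = "-" then 1 else 0) (needR l - pvDelta a)

def baseR : List String → Int
  | [] => 0
  | a :: l => pvDelta a * ((l.length : Int) + 1) + baseR l

theorem pvRun_cons (a : String) (l : List String) (s : Int × Int) :
    pvRun (a :: l) s = pvRun l (pvStep s.1 a, s.2 + pvStep s.1 a) := rfl

theorem pvRun_append (l₁ l₂ : List String) (s : Int × Int) :
    pvRun (l₁ ++ l₂) s = pvRun l₂ (pvRun l₁ s) := List.foldl_append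

-- essence accumulator is affine
theorem pvRun_affine (l : List String) (p t : Int) :
    pvRun l (p, t) = ((pvRun l (p, 0)).1, t + (pvRun l (p, 0)).2) := by
  induction l generalizing p t with
  | nil => simp [pvRun]
  | cons a l ih =>
    rw [pvRun_cons, pvRun_cons]
    simp only
    rw [ih (pvStep p a) (t + pvStep p a), ih (pvStep p a) (0 + pvStep p a)]
    simp [Prod.ext_iff]
    ring

-- clamp-free cycle: above needR the walk is linear
theorem pvRun_clampfree (l : List String) (p t : Int) (h : needR l ≤ p) :
    pvRun l (p, t) = (p + (l.map pvDelta).sum, t + baseR l + (l.length : Int) * p) := by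
  induction l generalizing p t with
  | nil => simp [pvRun, baseR]
  | cons a l ih =>
    have hstep : pvStep p a = p + pvDelta a := by
      by_cases h1 : a = "+"
      · simp [pvStep, pvDelta, h1]
      · by_cases h2 : a = "-"
        · have h3 : needR (a :: l) ≥ 1 := by
            simp [needR, h2]
          have h4 : 0 < p := by omega
          simp [pvStep, pvDelta, h2, h4]
          omega
        · simp [pvStep, pvDelta, h1, h2]
    have hneed : needR l ≤ p + pvDelta a := by
      have h5 : needR l - pvDelta a ≤ needR (a :: l) := by
        simp [needR]
      omega
    rw [pvRun_cons]
    simp only [hstep]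
    rw [ih (p + pvDelta a) (t + (p + pvDelta a)) hneed]
    simp only [Prod.ext_iff, baseR, List.map_cons, List.sum_cons, List.length_cons]
    push_cast
    constructor <;> ring

-- fixed point of the cycle map
theorem pvCyc_fixed (actions : List String) (p e : Int)
    (h : pvRun actions (p, 0) = (p, e)) (k : Nat) (t : Int) :
    pvCyc actions k (p, t) = (p, t + k * e) := by
  induction k generalizing t with
  | zero => simp [pvCyc]
  | succ k ih =>
    simp only [pvCyc]
    rw [pvRun_affine actions p t, h]
    simp only
    rw [ih (t + e)]
    simp [Prod.ext_iff]
    push_cast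
    ring

-- arithmetic series over k clamp-free cycles
theorem pvCyc_series (actions : List String) (net base : Int)
    (hnet : net = (actions.map pvDelta).sum) (hbase : base = baseR actions)
    (k : Nat) (p t : Int) (h : ∀ i : Nat, i < k → needR actions ≤ p + i * net) :
    pvCyc actions k (p, t) =
      (p + k * net,
       t + k * base + (actions.length : Int) * ((k : Int) * p + net * ((k * (k - 1) / 2 : Nat) : Int))) := by
  induction k generalizing p t with
  | zero => simp [pvCyc]
  | succ k ih =>
    have h0 : needR actions ≤ p := by
      have := h 0 (Nat.succ_pos k)
      simpa using this
    have htri : (((k + 1) * ((k + 1) - 1) / 2 : Nat) : Int) = ((k * (k - 1) / 2 : Nat) : Int) + (k : Int) := by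
      have h2 : (k + 1) * ((k + 1) - 1) / 2 = k * (k - 1) / 2 + k := by
        rcases k with _ | m
        · rfl
        · simp only [Nat.add_sub_cancel]
          have e1 : (m + 1 + 1) * (m + 1) = (m + 1) * m + 2 * (m + 1) := by ring
          omega
      rw [h2]
      push_cast
      ring
    simp only [pvCyc]
    have hrun : pvRun actions (p, t) = (p + net, t + base + (actions.length : Int) * p) := by
      rw [pvRun_clampfree actions p t h0, hnet, hbase]
    rw [hrun]
    rw [ih (p + net) (t + base + (actions.length : Int) * p)
      (fun i hi => by
        have := h (i + 1) (by omega)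
        push_cast at this ⊢
        nlinarith [this])]
    simp only [Prod.ext_iff, htri]
    push_cast
    constructor <;> ring

-- the least power making a whole cycle clamp-free is nonnegative
theorem needR_nonneg (l : List String) : 0 ≤ needR l := by
  cases l with
  | nil => simp [needR]
  | cons a l => simp only [needR]; omega

theorem pvNeed_aux (l : List String) (nd s : Int) (h : -s ≤ nd) :
    ((l.map pvDelta).foldl
      (fun (st : Int × Int) d =>
        (if d = -1 ∧ 1 - st.2 > st.1 then 1 - st.2 else st.1, st.2 + d)) (nd, s)).1
      = max nd (needR l - s) := by
  induction l generalizing nd s with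
  | nil =>
    simp [needR]
    omega
  | cons a l ih =>
    simp only [List.map_cons, List.foldl_cons]
    by_cases h2 : a = "-"
    · subst h2
      have hd : pvDelta "-" = -1 := by simp [pvDelta]
      rw [hd]
      by_cases h3 : 1 - s > nd
      · rw [if_pos (show (-1 : Int) = -1 ∧ 1 - s > nd from ⟨rfl, h3⟩)]
        rw [ih (1 - s) (s + -1) (by omega)]
        simp only [needR, hd, reduceIte]
        omega
      · rw [if_neg (show ¬ ((-1 : Int) = -1 ∧ 1 - s > nd) from fun hc => h3 hc.2)]
        rw [ih nd (s + -1) (by omega)]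
        simp only [needR, hd, reduceIte]
        omega
    · have hd : pvDelta a = (if a = "+" then 1 else 0) := by simp [pvDelta, h2]
      have hd1 : pvDelta a ≠ -1 := by rw [hd]; split <;> omega
      have hd0 : 0 ≤ pvDelta a := by rw [hd]; split <;> omega
      rw [if_neg (show ¬ (pvDelta a = -1 ∧ 1 - s > nd) from fun hc => hd1 hc.1)]
      rw [ih nd (s + pvDelta a) (by omega)]
      simp only [needR, if_neg h2]
      omega

theorem pvNeed_eq (actions : List String) : pvNeed (actions.map pvDelta) = needR actions := by
  unfold pvNeed
  rw [pvNeed_aux actions 0 0 (by omega)]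
  have := needR_nonneg actions
  omega

theorem pvBase_aux (l : List String) (b s : Int) :
    ((l.map pvDelta).foldl (fun (st : Int × Int) d => (st.1 + (st.2 + d), st.2 + d)) (b, s)).1
      = b + baseR l + (l.length : Int) * s := by
  induction l generalizing b s with
  | nil => simp [baseR]
  | cons a l ih =>
    simp only [List.map_cons, List.foldl_cons]
    rw [ih (b + (s + pvDelta a)) (s + pvDelta a)]
    simp only [baseR, List.length_cons]
    push_cast
    ring

theorem pvBase_eq (actions : List String) : pvBase (actions.map pvDelta) = baseR actions := by
  unfold pvBase
  rw [pvBase_aux actions 0 0]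
  ring

theorem pvRun_flatten (actions : List String) (q : Nat) (s : Int × Int) :
    pvRun ((List.replicate q actions).flatten) s = pvCyc actions q s := by
  induction q generalizing s with
  | zero => simp [pvRun, pvCyc]
  | succ q ih =>
    simp only [List.replicate_succ, List.flatten_cons, pvRun_append, pvCyc]
    exact ih _

theorem pvCyc_add (actions : List String) (a b : Nat) (s : Int × Int) :
    pvCyc actions (a + b) s = pvCyc actions b (pvCyc actions a s) := by
  induction a generalizing s with
  | zero => simp [pvCyc]
  | succ a ih =>
    have : a + 1 + b = (a + b) + 1 := by omega
    rw [this]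
    simp only [pvCyc]
    exact ih _

theorem tri_cast (net : Int) (m : Nat) (h1 : 1 ≤ m) :
    net * (m : Int) * ((m : Int) - 1) = 2 * (net * ((m * (m - 1) / 2 : Nat) : Int)) := by
  have heven : m * (m - 1) = 2 * (m * (m - 1) / 2) := by
    rcases m with _ | t
    · rfl
    · simp only [Nat.add_sub_cancel]
      obtain ⟨c, hc⟩ := Nat.even_mul_succ_self t
      have hcomm : (t + 1) * t = t * (t + 1) := by ring
      omega
  calc net * (m : Int) * ((m : Int) - 1)
      = net * ((m * (m - 1) : Nat) : Int) := by
        rw [Nat.cast_mul, Nat.cast_sub h1]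
        push_cast
        ring
    _ = net * ((2 * (m * (m - 1) / 2) : Nat) : Int) := by rw [← heven]
    _ = 2 * (net * ((m * (m - 1) / 2 : Nat) : Int)) := by push_cast; ring

-- pvLoop runs exactly q cycles
theorem pvLoop_eq_cyc (actions : List String) (q p total : Int) (hq : 0 ≤ q) :
    pvLoop actions (actions.length : Int) ((actions.map pvDelta).sum) (needR actions)
        (baseR actions) q p total = pvCyc actions q.toNat (p, total) := by
  suffices H : ∀ m : Nat, ∀ q p total : Int, 0 ≤ q → q.toNat = m →
      pvLoop actions (actions.length : Int) ((actions.map pvDelta).sum) (needR actions)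
        (baseR actions) q p total = pvCyc actions m (p, total) by
    exact H q.toNat q p total hq rfl
  intro m
  induction m using Nat.strong_induction_on with
  | _ m ih =>
    intro q p total hq0 hm
    rw [pvLoop]
    by_cases hqpos : 0 < q
    · rw [dif_pos hqpos]
      by_cases hp : needR actions ≤ p
      · rw [if_pos hp]
        set net := (actions.map pvDelta).sum with hnet
        set k : Int := if 0 ≤ net then q
            else min q (max 1 (-(PySem.Int.floordiv (p - needR actions + 1) net))) with hkdef
        have hk1 : 1 ≤ k ∧ k ≤ q := by
          rw [hkdef]
          split
          · omega
          · rename_i hneg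
            push_neg at hneg
            have he : PySem.Int.floordiv (p - needR actions + 1) net ≤ -1 := by
              have hfd := PySem.Int.floordiv_mul_add_mod (p - needR actions + 1) net
              have hmod := PySem.Int.mod_neg_bounds (a := p - needR actions + 1) hneg
              by_contra hcon
              push_neg at hcon
              have hge : 0 ≤ PySem.Int.floordiv (p - needR actions + 1) net := by omega
              have : PySem.Int.floordiv (p - needR actions + 1) net * net ≤ 0 :=
                mul_nonpos_of_nonneg_of_nonpos hge (le_of_lt hneg)
              omega
            omega
        have hcond : ∀ i : Nat, i < k.toNat → needR actions ≤ p + (i : Int) * net := by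
          intro i hi
          rw [hkdef] at hi
          by_cases hsg : 0 ≤ net
          · rw [if_pos hsg] at hi
            have : 0 ≤ (i : Int) * net := mul_nonneg (Int.natCast_nonneg i) hsg
            omega
          · rw [if_neg hsg] at hi
            push_neg at hsg
            have hfd := PySem.Int.floordiv_mul_add_mod (p - needR actions + 1) net
            have hmod := PySem.Int.mod_neg_bounds (a := p - needR actions + 1) hsg
            generalize hE : PySem.Int.floordiv (p - needR actions + 1) net = e at hfd hi
            generalize hM : PySem.Int.mod (p - needR actions + 1) net = M at hfd hmod
            have he : e ≤ -1 := by
              by_contra hcon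
              push_neg at hcon
              have hge : 0 ≤ e := by omega
              have h0 : e * net ≤ 0 := mul_nonpos_of_nonneg_of_nonpos hge (le_of_lt hsg)
              omega
            have hile : (i : Int) ≤ -e - 1 := by omega
            have hmul : (-e - 1) * net ≤ (i : Int) * net :=
              mul_le_mul_of_nonpos_right hile (le_of_lt hsg)
            have hexp : (-e - 1) * net = -(e * net) - net := by ring
            linarith [hmul, hexp, hfd, hmod.1, hmod.2]
        -- the recursive call via the induction hypothesis
        have hrec := ih (q - k).toNat (by omega) (q - k) (p + k * net)
          (total + k * baseR actions +
            (actions.length : Int) *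
              (k * p + PySem.Int.floordiv (net * k * (k - 1)) 2)) (by omega) rfl
        rw [hrec]
        have hsplit : m = k.toNat + (q - k).toNat := by omega
        rw [hsplit, pvCyc_add]
        have hser := pvCyc_series actions net (baseR actions) hnet rfl k.toNat p total hcond
        rw [hser]
        have hkc : ((k.toNat : Nat) : Int) = k := by omega
        have htri : PySem.Int.floordiv (net * k * (k - 1)) 2
            = net * ((k.toNat * (k.toNat - 1) / 2 : Nat) : Int) := by
          obtain ⟨m', hm'⟩ : ∃ m', m' = k.toNat := ⟨k.toNat, rfl⟩
          rw [← hm']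
          have hk' : k = (m' : Int) := by omega
          rw [hk']
          rw [tri_cast net m' (by omega)]
          rw [PySem.Int.floordiv_eq_ediv_of_pos (by norm_num)]
          exact Int.mul_ediv_cancel_left _ (by norm_num)
        rw [htri, hkc]
      · rw [if_neg hp]
        have hpe : pvRunCycle actions p = pvRun actions (p, 0) := rfl
        by_cases hfix : (pvRunCycle actions p).1 = p
        · rw [if_pos hfix]
          have hfp : pvRun actions (p, 0) = (p, (pvRunCycle actions p).2) := by
            rw [← hpe]
            exact Prod.ext_iff.mpr ⟨hfix, rfl⟩
          rw [pvCyc_fixed actions p (pvRunCycle actions p).2 hfp m total]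
          have hqm : ((m : Nat) : Int) = q := by omega
          rw [hqm]
          simp only [Prod.ext_iff]
          refine ⟨trivial, by ring⟩
        · rw [if_neg hfix]
          have hrec := ih (q - 1).toNat (by omega) (q - 1) (pvRunCycle actions p).1
            (total + (pvRunCycle actions p).2) (by omega) rfl
          rw [hrec]
          have hm1 : m = (q - 1).toNat + 1 := by omega
          rw [hm1]
          simp only [pvCyc]
          rw [pvRun_affine actions p total, ← hpe]
    · rw [dif_neg hqpos]
      have : m = 0 := by omega
      rw [this]
      rfl

-- A's mapped index list is q copies of actions plus a prefix
theorem map_range_take (actions : List String) (r : Nat) (hr : r ≤ actions.length) :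
    (List.range r).map (fun j => actions.getD (j % actions.length) "") = actions.take r := by
  apply List.ext_getElem
  · simp [hr]
  · intro i h1 h2
    simp only [List.getElem_map, List.getElem_range, List.getElem_take]
    rw [Nat.mod_eq_of_lt (by simp at h1; omega)]
    exact List.getD_eq_getElem _ _ (by simp at h1; omega)

theorem map_range_flatten (actions : List String) (q r : Nat) (hr : r ≤ actions.length) :
    (List.range (q * actions.length + r)).map (fun j => actions.getD (j % actions.length) "")
      = (List.replicate q actions).flatten ++ actions.take r := by
  induction q with
  | zero => simpa using map_range_take actions r hr
  | succ q ih =>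
    have he : (q + 1) * actions.length + r = actions.length + (q * actions.length + r) := by ring
    rw [he, List.range_add, List.map_append]
    have h1 : (List.range actions.length).map (fun j => actions.getD (j % actions.length) "")
        = actions := by
      apply List.ext_getElem
      · simp
      · intro i h1 h2
        simp only [List.getElem_map, List.getElem_range]
        rw [Nat.mod_eq_of_lt (by simpa using h1)]
        exact List.getD_eq_getElem _ _ (by simpa using h1)
    have h2 : ((List.range (q * actions.length + r)).map (fun x => actions.length + x)).map
        (fun j => actions.getD (j % actions.length) "")
        = (List.replicate q actions).flatten ++ actions.take r := by
      rw [List.map_map]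
      have hco : ((fun j => actions.getD (j % actions.length) "") ∘ fun x => actions.length + x)
          = fun j => actions.getD (j % actions.length) "" := by
        funext j
        simp [Nat.add_mod_left]
      rw [hco, ih]
    rw [h1, h2]
    simp [List.replicate_succ]

theorem pvMap_range (actions : List String) (q r : Nat) (hr : r ≤ actions.length) :
    (PySem.List.pyRange 0 ((q * actions.length + r : Nat) : Int) 1).map
        (fun i => PySem.List.pyGetD actions (PySem.Int.mod i (actions.length : Int)) "") =
      (List.replicate q actions).flatten ++ actions.take r := by
  rw [PySem.List.pyRange_one, List.map_map]
  have ht : (((q * actions.length + r : Nat) : Int) - 0).toNat = q * actions.length + r := by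
    omega
  rw [ht]
  have hco : ((fun i => PySem.List.pyGetD actions (PySem.Int.mod i (actions.length : Int)) "") ∘
      fun k : Nat => (0 : Int) + (k : Int))
      = fun j : Nat => actions.getD (j % actions.length) "" := by
    funext j
    show PySem.List.pyGetD actions (PySem.Int.mod ((0 : Int) + (j : Int)) (actions.length : Int)) ""
        = actions.getD (j % actions.length) ""
    rw [zero_add, PySem.Int.mod_natCast, PySem.List.pyGetD_natCast]
  rw [hco]
  exact map_range_flatten actions q r hr



-- A's foldl over indices is pvRun over the looked-up actions
theorem foldA_eq_run (actions : List String) (l : List Int) (s : Int × Int) :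
    l.foldl
      (fun (s : Int × Int) (i : Int) =>
        let action := PySem.List.pyGetD actions (PySem.Int.mod i (actions.length : Int)) ""
        let power : Int :=
          if action = "+" then s.1 + 1
          else if action = "-" ∧ s.1 > 0 then s.1 - 1
          else s.1
        (power, s.2 + power)) s
    = pvRun (l.map (fun i => PySem.List.pyGetD actions (PySem.Int.mod i (actions.length : Int)) "")) s := by
  induction l generalizing s with
  | nil => rfl
  | cons i l ih =>
    rw [List.foldl_cons, List.map_cons, pvRun_cons]
    exact ih _

-- ===== VERDICT (by name: the statement is the Claim_ definition above) =====
theorem calculate_total_essence_spec : Claim_equal_calculate_total_essence := by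
  intro actions segments sp _hdom hpre
  unfold Spec_calculate_total_essence
  by_cases hseg : segments ≤ 0
  · unfold calculate_total_essence calculate_total_essence_alt
    rw [if_pos hseg, PySem.List.pyRange_one_eq_nil hseg]
    rfl
  · push_neg at hseg
    have hne : actions ≠ [] := by
      rcases hpre with h | h
      · omega
      · exact h
    have hN : 1 ≤ actions.length := List.length_pos_iff.mpr hne
    have hN' : (1 : Int) ≤ (actions.length : Int) := by exact_mod_cast hN
    set qI : Int := PySem.Int.floordiv segments (actions.length : Int) with hqdef
    set rI : Int := PySem.Int.mod segments (actions.length : Int) with hrdef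
    have hq := PySem.Int.floordiv_mul_add_mod segments (actions.length : Int)
    rw [← hqdef, ← hrdef] at hq
    have hr0 : 0 ≤ rI := by
      rw [hrdef]
      exact PySem.Int.mod_nonneg _ (by omega)
    have hrN : rI < (actions.length : Int) := by
      rw [hrdef]
      exact PySem.Int.mod_lt _ (by omega)
    have hq0 : 0 ≤ qI := by
      by_contra hcon
      push_neg at hcon
      have h1 : qI ≤ -1 := by omega
      have h2 : qI * (actions.length : Int) ≤ -1 * (actions.length : Int) :=
        mul_le_mul_of_nonneg_right h1 (by omega)
      linarith
    have hA : calculate_total_essence actions segments sp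
        = (pvRun ((List.replicate qI.toNat actions).flatten ++ actions.take rI.toNat) (sp, 0)).2 := by
      unfold calculate_total_essence
      show (List.foldl
        (fun (s : Int × Int) (i : Int) =>
          let action := PySem.List.pyGetD actions (PySem.Int.mod i (actions.length : Int)) ""
          let power : Int :=
            if action = "+" then s.1 + 1
            else if action = "-" ∧ s.1 > 0 then s.1 - 1
            else s.1
          (power, s.2 + power)) (sp, 0) (PySem.List.pyRange 0 segments 1)).2 = _
      rw [foldA_eq_run]
      have hseg' : segments = ((qI.toNat * actions.length + rI.toNat : Nat) : Int) := by
        have hqc : ((qI.toNat : Nat) : Int) = qI := by omega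
        have hrc : ((rI.toNat : Nat) : Int) = rI := by omega
        push_cast
        rw [hqc, hrc]
        linarith
      rw [hseg', pvMap_range actions qI.toNat rI.toNat (by omega)]
    have hB : calculate_total_essence_alt actions segments sp
        = (pvRun (actions.take rI.toNat) (pvCyc actions qI.toNat (sp, 0))).2 := by
      unfold calculate_total_essence_alt
      show (if segments ≤ 0 then (0 : Int) else
        ((PySem.List.slice actions none (some (PySem.Int.mod segments (actions.length : Int)))).foldl
          (fun (s : Int × Int) a => let p' := pvStep s.1 a; (p', s.2 + p'))
          (pvLoop actions (actions.length : Int) (actions.map pvDelta).sum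
            (pvNeed (actions.map pvDelta)) (pvBase (actions.map pvDelta))
            (PySem.Int.floordiv segments (actions.length : Int)) sp 0)).2) = _
      rw [if_neg (by omega)]
      rw [pvNeed_eq, pvBase_eq, ← hqdef, ← hrdef]
      rw [pvLoop_eq_cyc actions qI sp 0 hq0]
      have hrc : rI = ((rI.toNat : Nat) : Int) := by omega
      rw [hrc, PySem.List.slice_to_natCast]
      rfl
    rw [hA, hB, pvRun_append, pvRun_flatten]
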